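-- pv_equiv track=rewrite | github.com/binderlabs/BugHound-MCP | bughound/tools/recon/waybackurls.py | _explain_endpoint_interest
-- ===== SOURCE A (Python) =====
-- from typing import Dict, List, Any, Set, Optional
--
-- def _explain_endpoint_interest(path: str) -> List[str]:
--     """Explain why an endpoint is interesting"""
--
--     reasons = []
--     path_lower = path.lower()
--
--     if any(term in path_lower for term in ['admin', 'manage', 'control']):
--         reasons.append("Administrative interface")
--
--     if any(term in path_lower for term in ['api', 'rest', 'json']):
--         reasons.append("API endpoint")
--
--     if any(term in path_lower for term in ['upload', 'file']):
--         reasons.append("File operation")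
--
--     if any(term in path_lower for term in ['login', 'auth']):
--         reasons.append("Authentication endpoint")
--
--     if any(term in path_lower for term in ['test', 'dev', 'debug']):
--         reasons.append("Development/test endpoint")
--
--     return reasons if reasons else ["Standard endpoint"]
-- ===== SOURCE B (Python) =====
-- # Single left-to-right scan over the path's suffixes: a mini multi-pattern
-- # matcher marks each label the first time one of its keywords starts at the
-- # current position, then labels are emitted in canonical order.
--
-- _TERM_LABEL = [
--     ('admin', "Administrative interface"),
--     ('manage', "Administrative interface"),
--     ('control', "Administrative interface"),
--     ('api', "API endpoint"),
--     ('rest', "API endpoint"),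
--     ('json', "API endpoint"),
--     ('upload', "File operation"),
--     ('file', "File operation"),
--     ('login', "Authentication endpoint"),
--     ('auth', "Authentication endpoint"),
--     ('test', "Development/test endpoint"),
--     ('dev', "Development/test endpoint"),
--     ('debug', "Development/test endpoint"),
-- ]
--
-- _LABEL_ORDER = [
--     "Administrative interface",
--     "API endpoint",
--     "File operation",
--     "Authentication endpoint",
--     "Development/test endpoint",
-- ]
--
-- def _explain_endpoint_interest(path: str):
--     p = path.lower()
--     matched = set()
--     for i in range(len(p)):
--         for term, label in _TERM_LABEL:
--             if label not in matched and p.startswith(term, i):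
--                 matched.add(label)
--     reasons = [lab for lab in _LABEL_ORDER if lab in matched]
--     return reasons if reasons else ["Standard endpoint"]
-- ===== Notes on version B (the rewrite author's own statement) =====
-- stated objective: alternative
-- what changed: Replaces A's five independent whole-string substring group checks by a single left-to-right scan over string positions that marks labels via startswith-at-position on a flat term->label table, then emits matched labels in canonical order.
import Mathlib
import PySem

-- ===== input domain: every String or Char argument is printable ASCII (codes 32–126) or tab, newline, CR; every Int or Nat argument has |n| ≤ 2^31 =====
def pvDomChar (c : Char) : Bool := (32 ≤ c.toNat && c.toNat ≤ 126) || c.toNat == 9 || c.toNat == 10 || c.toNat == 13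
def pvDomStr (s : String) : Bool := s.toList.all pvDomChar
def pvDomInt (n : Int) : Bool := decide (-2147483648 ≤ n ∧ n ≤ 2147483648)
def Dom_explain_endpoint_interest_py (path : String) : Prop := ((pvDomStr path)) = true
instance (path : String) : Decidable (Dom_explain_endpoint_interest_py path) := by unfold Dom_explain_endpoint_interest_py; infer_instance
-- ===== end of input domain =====

-- B replaces A's five independent substring group checks by one left-to-right scan over the suffixes
-- marking labels from a flat term->label table (objective: alternative decomposition; return value only).


-- ===== PORT A =====
def explain_endpoint_interest_py (path : String) : List String :=
  let path_lower := PySem.Str.lower path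
  let reasons : List String := []
  let reasons := if (["admin", "manage", "control"].any (fun term => PySem.Str.isIn term path_lower)) then reasons ++ ["Administrative interface"] else reasons
  let reasons := if (["api", "rest", "json"].any (fun term => PySem.Str.isIn term path_lower)) then reasons ++ ["API endpoint"] else reasons
  let reasons := if (["upload", "file"].any (fun term => PySem.Str.isIn term path_lower)) then reasons ++ ["File operation"] else reasons
  let reasons := if (["login", "auth"].any (fun term => PySem.Str.isIn term path_lower)) then reasons ++ ["Authentication endpoint"] else reasons
  let reasons := if (["test", "dev", "debug"].any (fun term => PySem.Str.isIn term path_lower)) then reasons ++ ["Development/test endpoint"] else reasons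
  if reasons ≠ [] then reasons else ["Standard endpoint"]

-- ===== PORT B =====
-- Source B's _TERM_LABEL flat table
def pvTermLabels : List (String × String) :=
  [ ("admin", "Administrative interface"),
    ("manage", "Administrative interface"),
    ("control", "Administrative interface"),
    ("api", "API endpoint"),
    ("rest", "API endpoint"),
    ("json", "API endpoint"),
    ("upload", "File operation"),
    ("file", "File operation"),
    ("login", "Authentication endpoint"),
    ("auth", "Authentication endpoint"),
    ("test", "Development/test endpoint"),
    ("dev", "Development/test endpoint"),
    ("debug", "Development/test endpoint") ]

-- Source B's _LABEL_ORDER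
def pvLabelOrder : List String :=
  [ "Administrative interface", "API endpoint", "File operation",
    "Authentication endpoint", "Development/test endpoint" ]

-- the body of Source B's inner `for term, label in _TERM_LABEL` loop at one position i;
-- Python's p.startswith(term, i) (0 <= i) is exactly a prefix test on p.drop i
def pvMarkAt (p : List Char) (matched : PySem.Set String) (i : Nat) : PySem.Set String :=
  pvTermLabels.foldl
    (fun m tl =>
      if (!PySem.Set.contains m tl.2) && PySem.Chars.startswith (p.drop i) tl.1.toList
      then PySem.Set.add m tl.2 else m)
    matched

def explain_endpoint_interest_py_alt (path : String) : List String :=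
  let p := (PySem.Str.lower path).toList
  let matched := (List.range p.length).foldl (pvMarkAt p) PySem.Set.empty
  let reasons := pvLabelOrder.filter (fun lab => PySem.Set.contains matched lab)
  if reasons = [] then ["Standard endpoint"] else reasons

-- ===== PRECONDITION & SPEC =====
def Spec_explain_endpoint_interest_py (path : String) (out : List String) : Prop := out = explain_endpoint_interest_py_alt path
instance (path : String) (out : List String) : Decidable (Spec_explain_endpoint_interest_py path out) := by unfold Spec_explain_endpoint_interest_py; infer_instance

-- ===== CLAIM =====
def Claim_equal_explain_endpoint_interest_py : Prop := ∀ (path : String), Dom_explain_endpoint_interest_py path → Spec_explain_endpoint_interest_py path (explain_endpoint_interest_py path)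

-- ===== LEMMAS AND PROOFS =====

-- membership in PySem.Set.add
theorem pv_contains_add (m : PySem.Set String) (x y : String) :
    PySem.Set.contains (PySem.Set.add m x) y = (PySem.Set.contains m y || x == y) := by
  rw [Bool.eq_iff_iff]
  simp only [Bool.or_eq_true, beq_iff_eq, PySem.Set.contains_iff, PySem.Set.mem_add]
  constructor
  · rintro (h | h) <;> [exact Or.inl h; exact Or.inr h.symm]
  · rintro (h | h) <;> [exact Or.inl h; exact Or.inr h.symm]

-- the inner term loop: final membership of L = old membership or some rule with label L fires here
theorem pv_inner (tail : List Char) (tls : List (String × String)) (m : PySem.Set String) (L : String) :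
    PySem.Set.contains
      (tls.foldl
        (fun m tl =>
          if (!PySem.Set.contains m tl.2) && PySem.Chars.startswith tail tl.1.toList
          then PySem.Set.add m tl.2 else m) m) L
    = (PySem.Set.contains m L || tls.any (fun tl => PySem.Chars.startswith tail tl.1.toList && tl.2 == L)) := by
  induction tls generalizing m with
  | nil => simp
  | cons tl rest ih =>
    simp only [List.foldl_cons, List.any_cons]
    by_cases hs : PySem.Chars.startswith tail tl.1.toList = true
    · by_cases hc : PySem.Set.contains m tl.2 = true
      · rw [if_neg (by rw [hc]; simp), ih, hs]
        by_cases hL : tl.2 = L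
        · subst hL
          have : PySem.Set.contains m tl.2 = true := hc
          rw [this]; simp
        · have hbe : (tl.2 == L) = false := by simp [hL]
          rw [hbe]; simp
      · have hcf : PySem.Set.contains m tl.2 = false := Bool.eq_false_iff.2 hc
        rw [if_pos (by rw [hcf, hs]; rfl), ih, pv_contains_add, hs]
        by_cases hL : tl.2 = L
        · subst hL; cases PySem.Set.contains m tl.2 <;> simp
        · have hbe : (tl.2 == L) = false := by simp [hL]
          rw [hbe]; simp [Bool.or_assoc]
    · have hsf : PySem.Chars.startswith tail tl.1.toList = false := Bool.eq_false_iff.2 hs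
      rw [if_neg (by rw [hsf]; simp), ih, hsf]
      simp

-- the outer position loop
theorem pv_outer (p : List Char) (idxs : List Nat) (m : PySem.Set String) (L : String) :
    PySem.Set.contains (idxs.foldl (pvMarkAt p) m) L
    = (PySem.Set.contains m L
       || idxs.any (fun i => pvTermLabels.any (fun tl => PySem.Chars.startswith (p.drop i) tl.1.toList && tl.2 == L))) := by
  induction idxs generalizing m with
  | nil => simp
  | cons i rest ih =>
    simp only [List.foldl_cons, List.any_cons, pvMarkAt]
    rw [ih, pv_inner]
    cases PySem.Set.contains m L <;> simp [Bool.or_assoc]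

-- scanning all suffixes with startswith = Python's 'sub in s', for a nonempty pattern
theorem pv_scan (p sub : List Char) (hsub : sub ≠ []) :
    (List.range p.length).any (fun i => PySem.Chars.startswith (p.drop i) sub)
    = PySem.Chars.isIn sub p := by
  rcases h : PySem.Chars.isIn sub p with _ | _
  · rw [PySem.Chars.isIn_eq_false_iff] at h
    simp only [List.any_eq_false, List.mem_range]
    intro i _ hst
    rw [PySem.Chars.startswith_iff] at hst
    exact h (List.infix_iff_prefix_suffix.2 ⟨p.drop i, hst, List.drop_suffix i p⟩)
  · rw [← PySem.Chars.exists_prefix_drop_iff_isIn] at h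
    obtain ⟨j, hj⟩ := h
    have hjlen : j < p.length := by
      by_contra hge
      rw [List.drop_eq_nil_of_le (Nat.le_of_not_lt hge)] at hj
      exact hsub (List.prefix_nil.1 hj)
    simp only [List.any_eq_true, List.mem_range]
    exact ⟨j, hjlen, (PySem.Chars.startswith_iff _ _).2 hj⟩

-- distribute 'any over positions' across a disjunction of patterns
theorem pv_any_or (xs : List Nat) (f g : Nat → Bool) :
    xs.any (fun i => f i || g i) = (xs.any f || xs.any g) := by
  induction xs with
  | nil => rfl
  | cons x t ih =>
    simp only [List.any_cons, ih]
    cases f x <;> cases g x <;> simp [Bool.or_comm, Bool.or_left_comm]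

theorem pv_scan_or2 (p a b : List Char) (ha : a ≠ []) (hb : b ≠ []) :
    (List.range p.length).any (fun i =>
      PySem.Chars.startswith (p.drop i) a || PySem.Chars.startswith (p.drop i) b)
    = (PySem.Chars.isIn a p || PySem.Chars.isIn b p) := by
  rw [pv_any_or, pv_scan _ _ ha, pv_scan _ _ hb]

theorem pv_scan_or3 (p a b c : List Char) (ha : a ≠ []) (hb : b ≠ []) (hc : c ≠ []) :
    (List.range p.length).any (fun i =>
      PySem.Chars.startswith (p.drop i) a
      || (PySem.Chars.startswith (p.drop i) b || PySem.Chars.startswith (p.drop i) c))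
    = (PySem.Chars.isIn a p || (PySem.Chars.isIn b p || PySem.Chars.isIn c p)) := by
  rw [pv_any_or, pv_any_or, pv_scan _ _ ha, pv_scan _ _ hb, pv_scan _ _ hc]

-- per-label characterisation of the scan's matched set
theorem pv_lab1 (p : List Char) :
    PySem.Set.contains ((List.range p.length).foldl (pvMarkAt p) PySem.Set.empty) "Administrative interface"
    = (PySem.Chars.isIn "admin".toList p || (PySem.Chars.isIn "manage".toList p || PySem.Chars.isIn "control".toList p)) := by
  rw [pv_outer]
  simp [pvTermLabels, PySem.Set.empty, PySem.Set.contains]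
  rw [pv_scan_or3 _ _ _ _ (by decide) (by decide) (by decide)]

theorem pv_lab2 (p : List Char) :
    PySem.Set.contains ((List.range p.length).foldl (pvMarkAt p) PySem.Set.empty) "API endpoint"
    = (PySem.Chars.isIn "api".toList p || (PySem.Chars.isIn "rest".toList p || PySem.Chars.isIn "json".toList p)) := by
  rw [pv_outer]
  simp [pvTermLabels, PySem.Set.empty, PySem.Set.contains]
  rw [pv_scan_or3 _ _ _ _ (by decide) (by decide) (by decide)]

theorem pv_lab3 (p : List Char) :
    PySem.Set.contains ((List.range p.length).foldl (pvMarkAt p) PySem.Set.empty) "File operation"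
    = (PySem.Chars.isIn "upload".toList p || PySem.Chars.isIn "file".toList p) := by
  rw [pv_outer]
  simp [pvTermLabels, PySem.Set.empty, PySem.Set.contains]
  rw [pv_scan_or2 _ _ _ (by decide) (by decide)]

theorem pv_lab4 (p : List Char) :
    PySem.Set.contains ((List.range p.length).foldl (pvMarkAt p) PySem.Set.empty) "Authentication endpoint"
    = (PySem.Chars.isIn "login".toList p || PySem.Chars.isIn "auth".toList p) := by
  rw [pv_outer]
  simp [pvTermLabels, PySem.Set.empty, PySem.Set.contains]
  rw [pv_scan_or2 _ _ _ (by decide) (by decide)]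

theorem pv_lab5 (p : List Char) :
    PySem.Set.contains ((List.range p.length).foldl (pvMarkAt p) PySem.Set.empty) "Development/test endpoint"
    = (PySem.Chars.isIn "test".toList p || (PySem.Chars.isIn "dev".toList p || PySem.Chars.isIn "debug".toList p)) := by
  rw [pv_outer]
  simp [pvTermLabels, PySem.Set.empty, PySem.Set.contains]
  rw [pv_scan_or3 _ _ _ _ (by decide) (by decide) (by decide)]

-- ===== VERDICT =====
theorem explain_endpoint_interest_py_spec : Claim_equal_explain_endpoint_interest_py := by
  intro path _
  unfold Spec_explain_endpoint_interest_py
  unfold explain_endpoint_interest_py explain_endpoint_interest_py_alt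
  simp only [PySem.Str.isIn_eq, List.any_cons, List.any_nil, Bool.or_false,
    pvLabelOrder, List.filter_cons, List.filter_nil]
  rw [pv_lab1, pv_lab2, pv_lab3, pv_lab4, pv_lab5]
  cases h1 : (PySem.Chars.isIn "admin".toList (PySem.Str.lower path).toList || (PySem.Chars.isIn "manage".toList (PySem.Str.lower path).toList || PySem.Chars.isIn "control".toList (PySem.Str.lower path).toList)) <;>
  cases h2 : (PySem.Chars.isIn "api".toList (PySem.Str.lower path).toList || (PySem.Chars.isIn "rest".toList (PySem.Str.lower path).toList || PySem.Chars.isIn "json".toList (PySem.Str.lower path).toList)) <;>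
  cases h3 : (PySem.Chars.isIn "upload".toList (PySem.Str.lower path).toList || PySem.Chars.isIn "file".toList (PySem.Str.lower path).toList) <;>
  cases h4 : (PySem.Chars.isIn "login".toList (PySem.Str.lower path).toList || PySem.Chars.isIn "auth".toList (PySem.Str.lower path).toList) <;>
  cases h5 : (PySem.Chars.isIn "test".toList (PySem.Str.lower path).toList || (PySem.Chars.isIn "dev".toList (PySem.Str.lower path).toList || PySem.Chars.isIn "debug".toList (PySem.Str.lower path).toList)) <;>
  simp
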